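-- pv_equiv track=rewrite | github.com/katomonium/regex-to-code | desenhaGrafo/drawing.py | juntaTransicoes
-- ===== SOURCE A (Python) =====
-- def juntaTransicoes(trans):
--     t = []
--     for i in trans:
--         li = [(a, b, c) for (a, b, c) in t if i[0] == a and i[2] == c]
--
--         if(not len(li)):
--             t.append(i)
--
--         else:
--             for j in li:
--                 _j = list(t[t.index(j)])
--                 _j[1] = t[t.index(j)][1] + ", " + i[1]
--                 t[t.index(j)] = tuple(_j)
--
--     return t
-- ===== SOURCE B (Python) =====
-- def juntaTransicoes(trans):
--     out = []
--     pend = trans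
--     while pend:
--         a, b, c = pend[0]
--         lab = b
--         kept = []
--         for (x, y, z) in pend[1:]:
--             if x == a and z == c:
--                 lab = lab + ", " + y
--             else:
--                 kept.append((x, y, z))
--         out.append((a, lab, c))
--         pend = kept
--     return out
-- ===== Notes on version B (the rewrite author's own statement) =====
-- stated objective: alternative
-- what changed: Replaced A's grow-and-patch accumulator (rescan the output list and patch entries via repeated list.index) with repeated group extraction: take the first pending transition, sweep the rest once merging same-(source,dest) labels and keeping the others as the new pending list, emitting one output row per sweep.
import Mathlib
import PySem

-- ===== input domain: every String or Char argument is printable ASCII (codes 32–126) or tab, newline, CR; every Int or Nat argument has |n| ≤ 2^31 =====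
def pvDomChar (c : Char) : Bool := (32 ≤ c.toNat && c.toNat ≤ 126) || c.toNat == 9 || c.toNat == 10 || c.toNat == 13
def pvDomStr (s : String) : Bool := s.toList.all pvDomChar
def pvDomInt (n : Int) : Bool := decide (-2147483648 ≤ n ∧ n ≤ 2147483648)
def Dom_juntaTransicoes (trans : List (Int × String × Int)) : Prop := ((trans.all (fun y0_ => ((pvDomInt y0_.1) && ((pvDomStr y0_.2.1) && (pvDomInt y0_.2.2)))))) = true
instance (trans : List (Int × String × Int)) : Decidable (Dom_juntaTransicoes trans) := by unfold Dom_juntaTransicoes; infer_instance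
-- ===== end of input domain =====

-- B replaces A's grow-and-patch accumulator with repeated group extraction
-- (peel the first pending transition, merge its group in one sweep, recurse
-- on the kept remainder): an alternative algorithm of similar cost.


-- ===== PORT A =====
-- one loop iteration of A: compute li, then append or merge via t.index(j)
def pvAStep (t : List (Int × String × Int)) (i : Int × String × Int) :
    List (Int × String × Int) :=
  let li := t.filter (fun p => i.1 == p.1 && i.2.2 == p.2.2)
  if li.length == 0 then
    t ++ [i]
  else
    li.foldl (fun t' j =>
      match PySem.List.index? t' j with
      | some m => t'.set m (j.1, j.2.1 ++ ", " ++ i.2.1, j.2.2)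
      | none => t'  -- Python's list.index would raise ValueError; unreachable (j ∈ li ⊆ t)
      ) t

def juntaTransicoes (trans : List (Int × String × Int)) : List (Int × String × Int) :=
  trans.foldl pvAStep []

-- ===== PORT B =====
-- B's inner for-loop body: merge a matching label into lab, or append to kept
def pvBStep (a c : Int) (st : String × List (Int × String × Int))
    (p : Int × String × Int) : String × List (Int × String × Int) :=
  if p.1 == a && p.2.2 == c then (st.1 ++ ", " ++ p.2.1, st.2) else (st.1, st.2 ++ [p])

-- the kept list never gets longer than the swept list (for termination)
theorem pvBStep_len (a c : Int) :
    ∀ (l : List (Int × String × Int)) (st : String × List (Int × String × Int)),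
      ((l.foldl (pvBStep a c) st).2).length ≤ st.2.length + l.length := by
  intro l
  induction l with
  | nil => intro st; simp
  | cons p tl ih =>
    intro st
    simp only [List.foldl_cons]
    refine le_trans (ih _) ?_
    unfold pvBStep
    split_ifs <;> simp <;> omega

-- B's while-loop: peel the first pending transition, sweep the rest, recurse
def pvBLoop (out : List (Int × String × Int)) :
    List (Int × String × Int) → List (Int × String × Int)
  | [] => out
  | (a, b, c) :: rest =>
    let s := rest.foldl (pvBStep a c) (b, [])
    pvBLoop (out ++ [(a, s.1, c)]) s.2
termination_by pend => pend.length
decreasing_by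
  have := pvBStep_len a c rest (b, [])
  simp only [List.length_nil] at this
  simpa using Nat.lt_succ_of_le this

def juntaTransicoes_alt (trans : List (Int × String × Int)) : List (Int × String × Int) :=
  pvBLoop [] trans

-- ===== PRECONDITION & SPEC =====
def Spec_juntaTransicoes (trans : List (Int × String × Int)) (out : List (Int × String × Int)) : Prop := out = juntaTransicoes_alt trans
instance (trans : List (Int × String × Int)) (out : List (Int × String × Int)) : Decidable (Spec_juntaTransicoes trans out) := by unfold Spec_juntaTransicoes; infer_instance

-- ===== CLAIM (what is proved, stated in full; the proofs are below) =====
def Claim_equal_juntaTransicoes : Prop := ∀ (trans : List (Int × String × Int)), Dom_juntaTransicoes trans → Spec_juntaTransicoes trans (juntaTransicoes trans)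

-- ===== LEMMAS AND PROOFS =====

-- the merge key of a transition
def pvKey (p : Int × String × Int) : Int × Int := (p.1, p.2.2)

theorem pvCondA_eq (i p : Int × String × Int) :
    (i.1 == p.1 && i.2.2 == p.2.2) = (pvKey p == pvKey i) := by
  rcases p with ⟨p1, p2, p3⟩
  rcases i with ⟨i1, i2, i3⟩
  have hr : (((p1, p3) : Int × Int) == (i1, i3)) = (p1 == i1 && p3 == i3) := rfl
  simp only [pvKey, hr]
  rw [Bool.eq_iff_iff]
  simp only [Bool.and_eq_true, beq_iff_eq]
  constructor <;> rintro ⟨x, y⟩ <;> exact ⟨x.symm, y.symm⟩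

theorem pvCondB_eq (i p : Int × String × Int) :
    (p.1 == i.1 && p.2.2 == i.2.2) = (pvKey p == pvKey i) := by
  rcases p with ⟨p1, p2, p3⟩
  rcases i with ⟨i1, i2, i3⟩
  have hr : (((p1, p3) : Int × Int) == (i1, i3)) = (p1 == i1 && p3 == i3) := rfl
  simp only [pvKey, hr]

-- the label a base b collects from the matching entries of l, in order
def pvLab (k : Int × Int) (b : String) (l : List (Int × String × Int)) : String :=
  (l.filter (fun p => pvKey p == k)).foldl (fun acc p => acc ++ ", " ++ p.2.1) b

-- every entry of t with all matching labels of tl merged in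
def pvMerge (t tl : List (Int × String × Int)) : List (Int × String × Int) :=
  t.map (fun p => (p.1, pvLab (pvKey p) p.2.1 tl, p.2.2))

theorem pvBStep_split (a c : Int) :
    ∀ (l : List (Int × String × Int)) (st : String × List (Int × String × Int)),
      l.foldl (pvBStep a c) st =
        ((l.filter (fun p => pvKey p == pvKey (a, "", c))).foldl
            (fun acc p => acc ++ ", " ++ p.2.1) st.1,
         st.2 ++ l.filter (fun p => !(pvKey p == pvKey (a, "", c)))) := by
  intro l
  induction l with
  | nil => intro st; simp
  | cons p tl ih =>
    intro st
    rw [List.foldl_cons, ih, List.filter_cons, List.filter_cons]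
    have hcond : (p.1 == a && p.2.2 == c) = (pvKey p == pvKey ((a, "", c) : Int × String × Int)) :=
      pvCondB_eq (a, "", c) p
    by_cases h : (pvKey p == pvKey ((a, "", c) : Int × String × Int)) = true
    · simp [pvBStep, hcond, h]
    · have h' : (pvKey p == pvKey ((a, "", c) : Int × String × Int)) = false :=
        Bool.eq_false_iff.mpr h
      simp [pvBStep, hcond, h']

theorem pv_upd (i : Int × String × Int) :
    ∀ (t : List (Int × String × Int)), (t.map pvKey).Nodup →
      ∀ j ∈ t, pvKey j = pvKey i →
        t.filter (fun p => pvKey p == pvKey i) = [j] ∧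
        ∃ m, PySem.List.index? t j = some m ∧
          t.set m (j.1, j.2.1 ++ ", " ++ i.2.1, j.2.2) =
            t.map (fun p => if pvKey p == pvKey i
                            then (p.1, p.2.1 ++ ", " ++ i.2.1, p.2.2) else p) := by
  intro t
  induction t with
  | nil => intro _ j hj; cases hj
  | cons q tl ih =>
    intro hnd j hj hkey
    simp only [List.map_cons, List.nodup_cons] at hnd
    by_cases hq : pvKey q = pvKey i
    · have htl : ∀ p ∈ tl, pvKey p ≠ pvKey i := by
        intro p hp hpk
        exact hnd.1 (by rw [hq, ← hpk]; exact List.mem_map_of_mem hp)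
      have hjq : j = q := by
        rcases List.mem_cons.mp hj with h | h
        · exact h
        · exact absurd hkey (htl _ h)
      subst hjq
      have hfiltl : tl.filter (fun p => pvKey p == pvKey i) = [] := by
        apply List.filter_eq_nil_iff.mpr
        intro p hp
        simp [htl p hp]
      refine ⟨?_, 0, ?_, ?_⟩
      · rw [List.filter_cons]
        simp [hq, hfiltl]
      · exact PySem.List.index?_cons_self j tl
      · rw [List.set_cons_zero, List.map_cons, if_pos (by simp [hq])]
        congr 1
        refine ((List.map_congr_left ?_).trans (List.map_id tl)).symm
        intro p hp
        simp [htl p hp]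
    · have hj' : j ∈ tl := by
        rcases List.mem_cons.mp hj with h | h
        · exact absurd (h ▸ hkey) hq
        · exact h
      obtain ⟨hfil, m, hidx, hset⟩ := ih hnd.2 j hj' hkey
      have hne : q ≠ j := fun h => hq (h ▸ hkey)
      refine ⟨?_, m + 1, ?_, ?_⟩
      · rw [List.filter_cons, if_neg (by simp [hq]), hfil]
      · rw [PySem.List.index?_cons_of_ne tl hne, hidx]; rfl
      · rw [List.set_cons_succ, List.map_cons, if_neg (by simp [hq]), hset]

-- A's step when the key is absent: plain append
theorem pvAStep_new (t : List (Int × String × Int)) (i : Int × String × Int)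
    (h : ∀ p ∈ t, pvKey p ≠ pvKey i) : pvAStep t i = t ++ [i] := by
  unfold pvAStep
  have hfil : t.filter (fun p => i.1 == p.1 && i.2.2 == p.2.2) = [] := by
    apply List.filter_eq_nil_iff.mpr
    intro p hp
    rw [pvCondA_eq]
    simp [h p hp]
  simp [hfil]

-- A's step when the key is present: pointwise label patch
theorem pvAStep_old (t : List (Int × String × Int)) (i : Int × String × Int)
    (hnd : (t.map pvKey).Nodup) (j : Int × String × Int) (hj : j ∈ t)
    (hkey : pvKey j = pvKey i) :
    pvAStep t i = t.map (fun p => if pvKey p == pvKey i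
                                  then (p.1, p.2.1 ++ ", " ++ i.2.1, p.2.2) else p) := by
  obtain ⟨hfil, m, hidx, hset⟩ := pv_upd i t hnd j hj hkey
  unfold pvAStep
  simp only [pvCondA_eq, hfil, List.length_cons, List.length_nil, List.foldl_cons,
    List.foldl_nil]
  rw [if_neg (by decide), hidx]
  exact hset

-- the invariant tying A's accumulator fold to B's group-extraction loop
theorem pv_inv :
    ∀ (tl t : List (Int × String × Int)), (t.map pvKey).Nodup →
      tl.foldl pvAStep t =
        pvBLoop (pvMerge t tl) (tl.filter (fun p => !(t.map pvKey).contains (pvKey p))) := by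
  intro tl
  induction tl with
  | nil =>
    intro t _
    simp [pvMerge, pvLab, pvBLoop]
  | cons i tl ih =>
    intro t hnd
    rw [List.foldl_cons]
    by_cases hc : pvKey i ∈ t.map pvKey
    · -- existing key: patch in place, key set unchanged, i dropped from pending
      obtain ⟨j, hj, hjk⟩ := List.mem_map.mp hc
      rw [pvAStep_old t i hnd j hj hjk]
      set t' := t.map (fun p => if pvKey p == pvKey i
                                then (p.1, p.2.1 ++ ", " ++ i.2.1, p.2.2) else p) with ht'
      have hkeys : t'.map pvKey = t.map pvKey := by
        rw [ht', List.map_map]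
        apply List.map_congr_left
        intro p _
        simp only [Function.comp_apply]
        by_cases h : (pvKey p == pvKey i) = true
        · rw [if_pos h]; rfl
        · rw [if_neg h]
      rw [ih t' (by rw [hkeys]; exact hnd)]
      have hmerge : pvMerge t' tl = pvMerge t (i :: tl) := by
        rw [ht', pvMerge, pvMerge, List.map_map]
        apply List.map_congr_left
        intro p _
        by_cases h : pvKey p = pvKey i
        · simp only [Function.comp_apply, if_pos (by simp [h] : (pvKey p == pvKey i) = true)]
          have hk2 : pvKey ((p.1, p.2.1 ++ ", " ++ i.2.1, p.2.2) : Int × String × Int) =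
              pvKey p := rfl
          simp only [hk2, Prod.mk.injEq, true_and]
          refine ⟨?_, trivial⟩
          unfold pvLab
          rw [List.filter_cons, if_pos (by simp [h]), List.foldl_cons]
        · have hif : (if (pvKey p == pvKey i) = true
              then ((p.1, p.2.1 ++ ", " ++ i.2.1, p.2.2) : Int × String × Int) else p) = p :=
            if_neg (by simp only [beq_iff_eq]; exact h)
          simp only [Function.comp_apply, hif]
          unfold pvLab
          have hfc : (i :: tl).filter (fun q => pvKey q == pvKey p) =
              tl.filter (fun q => pvKey q == pvKey p) :=
            List.filter_cons_of_neg (by simp only [beq_iff_eq]; exact fun hh => h hh.symm)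
          rw [hfc]
      have hfil : (i :: tl).filter (fun p => !(t.map pvKey).contains (pvKey p)) =
          tl.filter (fun p => !(t.map pvKey).contains (pvKey p)) := by
        rw [List.filter_cons, if_neg (by simp [List.contains_iff_mem, hc])]
      rw [hmerge, hkeys, hfil]
    · -- fresh key: append to the accumulator, i becomes a pending group head
      have hnotin : ∀ p ∈ t, pvKey p ≠ pvKey i := by
        intro p hp h
        exact hc (h ▸ List.mem_map_of_mem hp)
      rw [pvAStep_new t i hnotin]
      have hnd' : ((t ++ [i]).map pvKey).Nodup := by
        simp only [List.map_append, List.map_cons, List.map_nil]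
        refine List.Nodup.append hnd (List.nodup_singleton _) ?_
        intro x hx hx2
        rw [List.mem_singleton] at hx2
        obtain ⟨p, hp, hpk⟩ := List.mem_map.mp hx
        exact hnotin p hp (hx2 ▸ hpk)
      rw [ih (t ++ [i]) hnd']
      have hfilcons : (i :: tl).filter (fun p => !(t.map pvKey).contains (pvKey p)) =
          i :: tl.filter (fun p => !(t.map pvKey).contains (pvKey p)) := by
        rw [List.filter_cons, if_pos (by simp [List.contains_iff_mem, hc])]
      rw [hfilcons]
      have hkeyi : pvKey ((i.1, "", i.2.2) : Int × String × Int) = pvKey i := rfl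
      have hstep : pvBLoop (pvMerge t (i :: tl))
            (i :: tl.filter (fun p => !(t.map pvKey).contains (pvKey p))) =
          pvBLoop (pvMerge t (i :: tl) ++
              [(i.1, ((tl.filter (fun p => !(t.map pvKey).contains (pvKey p))).filter
                  (fun p => pvKey p == pvKey i)).foldl
                    (fun acc p => acc ++ ", " ++ p.2.1) i.2.1, i.2.2)])
            ((tl.filter (fun p => !(t.map pvKey).contains (pvKey p))).filter
              (fun p => !(pvKey p == pvKey i))) := by
        conv_lhs => rw [show i = (i.1, i.2.1, i.2.2) from rfl]
        rw [pvBLoop, pvBStep_split]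
        simp only [hkeyi, List.nil_append]
      rw [hstep]
      -- match the three components
      have hlab : (tl.filter (fun p => !(t.map pvKey).contains (pvKey p))).filter
            (fun p => pvKey p == pvKey i) =
          tl.filter (fun p => pvKey p == pvKey i) := by
        rw [List.filter_filter]
        apply List.filter_congr
        intro p _
        by_cases h : pvKey p = pvKey i
        · have : (t.map pvKey).contains (pvKey p) = false := by
            rw [h]
            exact Bool.eq_false_iff.mpr (fun hcc => hc (List.contains_iff_mem.mp hcc))
          simp [h, this]
          exact fun x y z hm => hnotin (x, y, z) hm
        · simp [h]
      have hmerge : pvMerge (t ++ [i]) tl =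
          pvMerge t (i :: tl) ++
            [(i.1, (tl.filter (fun p => pvKey p == pvKey i)).foldl
                (fun acc p => acc ++ ", " ++ p.2.1) i.2.1, i.2.2)] := by
        unfold pvMerge
        rw [List.map_append]
        congr 1
        · apply List.map_congr_left
          intro p hp
          have : pvLab (pvKey p) p.2.1 (i :: tl) = pvLab (pvKey p) p.2.1 tl := by
            unfold pvLab
            rw [List.filter_cons,
              if_neg (by simp only [beq_iff_eq]; exact fun hh => hnotin p hp hh.symm)]
          rw [this]
      have hkept : (tl.filter (fun p => !(t.map pvKey).contains (pvKey p))).filter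
            (fun p => !(pvKey p == pvKey i)) =
          tl.filter (fun p => !((t ++ [i]).map pvKey).contains (pvKey p)) := by
        rw [List.filter_filter]
        apply List.filter_congr
        intro p _
        simp only [List.map_append, List.map_cons, List.map_nil, List.contains_append]
        by_cases h1 : pvKey p = pvKey i
        · simp [h1]
        · by_cases h2 : (t.map pvKey).contains (pvKey p) = true <;>
            simp [h1, h2, List.contains_iff_mem]
      rw [hlab, hmerge, hkept]

-- ===== VERDICT (by name: the statement is the Claim_ definition above) =====
theorem juntaTransicoes_spec : Claim_equal_juntaTransicoes := by
  intro trans _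
  unfold Spec_juntaTransicoes juntaTransicoes juntaTransicoes_alt
  have h := pv_inv trans [] (by simp)
  simpa using h
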